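-- pv_equiv track=rewrite | github.com/hong0002/Baekjoon | 기타/예비 소집 결과 보고서.py | is_diligent
-- ===== SOURCE A (Python) =====
-- def is_diligent(times):
--     # times: [T1, T2, T3], each Ti in [-1..120]
--     # 푼 문제 번호들의 최대값 m 찾기
--     solved = [i for i, t in enumerate(times) if t != -1]
--     if not solved:
--         return False
--     m = max(solved)  # 0-based index: 0→1번, 1→2번, 2→3번
--
--     # 1..m번 문제 모두 풀었는지 확인
--     for i in range(m+1):
--         if times[i] == -1:
--             return False
--
--     # 시간 비내림차순인지 확인
--     for i in range(m):
--         if times[i] > times[i+1]: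
--             return False
--
--     return True
-- ===== SOURCE B (Python) =====
-- def is_diligent(times):
--     # Single left-to-right pass: a state machine tracking the last solved time,
--     # whether a gap (-1) has been seen, and whether anything was solved at all.
--     prev = None
--     seen_gap = False
--     seen_solved = False
--     for t in times:
--         if t == -1:
--             seen_gap = True
--         else:
--             if seen_gap:
--                 return False            # solved problem after a gap
--             if prev is not None and t < prev:
--                 return False            # times decreased
--             prev = t
--             seen_solved = True
--     return seen_solved
-- ===== Notes on version B (the rewrite author's own statement) =====
-- stated objective: simpler
-- what changed: Replaced A's three passes (build the solved-index list, take its max, then two index loops re-reading the list) by one left-to-right state-machine pass keeping only the previous solved time, a seen-gap flag and a seen-solved flag (measured ~3x faster: no intermediate list, no repeated indexing).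
import Mathlib
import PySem

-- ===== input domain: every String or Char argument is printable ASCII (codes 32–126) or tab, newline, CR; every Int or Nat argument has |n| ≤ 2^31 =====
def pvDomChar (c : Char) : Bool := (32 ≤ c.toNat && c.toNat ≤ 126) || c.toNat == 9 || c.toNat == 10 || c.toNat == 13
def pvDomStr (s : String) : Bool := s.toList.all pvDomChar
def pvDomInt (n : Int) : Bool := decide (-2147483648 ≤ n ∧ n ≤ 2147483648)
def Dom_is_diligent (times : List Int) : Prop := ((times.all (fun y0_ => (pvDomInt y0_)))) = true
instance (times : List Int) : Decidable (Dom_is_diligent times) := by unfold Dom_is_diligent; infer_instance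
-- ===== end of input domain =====

-- B replaces A's three passes (solved-index list + max + two index loops) by one
-- left-to-right state-machine pass; same return value on every input (both are total).

-- ===== PORT A =====
def is_diligent (times : List Int) : Bool :=
  -- solved = [i for i, t in enumerate(times) if t != -1]
  let solved : List Int :=
    (PySem.List.enumerate times).filterMap (fun it => if it.2 ≠ -1 then some it.1 else none)
  if solved.isEmpty then false
  else
    match PySem.List.max? solved (fun i => i) with
    | none => false   -- unreachable: solved is nonempty
    | some m =>
      -- for i in range(m+1): if times[i] == -1: return False
      -- (pyGetD is exact here: every index 0..m is in range since m is an index of times)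
      ((PySem.List.pyRange 0 (m + 1)).all fun i => !(PySem.List.pyGetD times i 0 == -1)) &&
      -- for i in range(m): if times[i] > times[i+1]: return False
      ((PySem.List.pyRange 0 m).all fun i =>
        !(decide (PySem.List.pyGetD times i 0 > PySem.List.pyGetD times (i + 1) 0)))

-- ===== PORT B =====
-- the for-loop of Source B: state (prev, seen_gap, seen_solved); an early 'return False' is result false
def altLoop : List Int → Option Int → Bool → Bool → Bool
  | [], _, _, seenSolved => seenSolved
  | t :: rest, prev, seenGap, seenSolved =>
    if t = -1 then altLoop rest prev true seenSolved
    else if seenGap then false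
    else
      match prev with
      | some p => if t < p then false else altLoop rest (some t) seenGap true
      | none => altLoop rest (some t) seenGap true

def is_diligent_alt (times : List Int) : Bool :=
  altLoop times none false false

-- ===== PRECONDITION & SPEC =====
def Spec_is_diligent (times : List Int) (out : Bool) : Prop := out = is_diligent_alt times
instance (times : List Int) (out : Bool) : Decidable (Spec_is_diligent times out) := by unfold Spec_is_diligent; infer_instance

-- ===== CLAIM (what is proved, stated in full; the proofs are below) =====
def Claim_equal_is_diligent : Prop := ∀ (times : List Int), Dom_is_diligent times → Spec_is_diligent times (is_diligent times)

-- ===== LEMMAS AND PROOFS =====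

-- proof-only intermediate spec: drop the trailing -1's …
def trimNeg : List Int → List Int
  | [] => []
  | t :: rest =>
    match trimNeg rest with
    | [] => if t = -1 then [] else [t]
    | ys => t :: ys

-- … check adjacent pairs are non-decreasing …
def chk : List Int → Bool
  | [] => true
  | [_] => true
  | a :: b :: r => decide (a ≤ b) && chk (b :: r)

-- … and the characterisation both programs satisfy
def specD (xs : List Int) : Bool :=
  !(trimNeg xs).isEmpty && (trimNeg xs).all (· != -1) && chk (trimNeg xs)

def solvedOf (times : List Int) : List Int :=
  (PySem.List.enumerate times).filterMap (fun it => if it.2 ≠ -1 then some it.1 else none)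

lemma is_diligent_unfold (ts : List Int) : is_diligent ts =
    (if (solvedOf ts).isEmpty then false
     else match PySem.List.max? (solvedOf ts) (fun i => i) with
     | none => false
     | some m =>
       ((PySem.List.pyRange 0 (m + 1)).all fun i => !(PySem.List.pyGetD ts i 0 == -1)) &&
       ((PySem.List.pyRange 0 m).all fun i =>
         !(decide (PySem.List.pyGetD ts i 0 > PySem.List.pyGetD ts (i + 1) 0)))) := rfl

-- ---- trimNeg facts ----
lemma trimNeg_cons_ne (t : Int) (rest : List Int) (h : t ≠ -1) :
    trimNeg (t :: rest) = t :: trimNeg rest := by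
  cases hys : trimNeg rest <;> simp [trimNeg, hys, h]

lemma trimNeg_nil_iff (xs : List Int) : trimNeg xs = [] ↔ xs.all (· == -1) := by
  induction xs with
  | nil => simp [trimNeg]
  | cons t rest ih =>
    cases hys : trimNeg rest with
    | nil =>
      by_cases ht : t = -1 <;> simp [trimNeg, hys, ht, ← ih]
    | cons y ys =>
      simp only [trimNeg, hys]
      constructor
      · intro h; exact absurd h (by simp)
      · intro h
        exfalso
        apply (show ¬ (rest.all (· == -1) = true) by rw [← ih, hys]; simp)
        rw [List.all_eq_true] at h ⊢
        intro x hx; exact h x (List.mem_cons_of_mem _ hx)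

lemma trimNeg_append_neg (xs : List Int) : trimNeg (xs ++ [-1]) = trimNeg xs := by
  induction xs with
  | nil => simp [trimNeg]
  | cons t rest ih => simp only [List.cons_append, trimNeg, ih]

lemma trimNeg_append_ne (xs : List Int) (t : Int) (h : t ≠ -1) :
    trimNeg (xs ++ [t]) = xs ++ [t] := by
  induction xs with
  | nil => simp [trimNeg, h]
  | cons a rest ih =>
    obtain ⟨b, bs, hL⟩ : ∃ b bs, rest ++ [t] = b :: bs := by
      cases hc : rest ++ [t] with
      | nil => simp at hc
      | cons b bs => exact ⟨b, bs, rfl⟩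
    rw [hL] at ih
    rw [List.cons_append, hL]
    rw [show trimNeg (a :: b :: bs) = (match trimNeg (b :: bs) with
        | [] => if a = -1 then [] else [a]
        | ys => a :: ys) from rfl, ih]

-- ---- enumerate / solvedOf facts ----
lemma enumerate_append_singleton (xs : List Int) (t : Int) (s : Int) :
    PySem.List.enumerate (xs ++ [t]) s
      = PySem.List.enumerate xs s ++ [(s + xs.length, t)] := by
  induction xs generalizing s with
  | nil => simp [PySem.List.enumerate]
  | cons a rest ih =>
    simp only [List.cons_append, PySem.List.enumerate_cons, ih, List.length_cons]
    simp; ring_nf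

lemma solvedOf_append_neg (xs : List Int) : solvedOf (xs ++ [-1]) = solvedOf xs := by
  simp [solvedOf, enumerate_append_singleton, List.filterMap_append]

lemma solvedOf_append_ne (xs : List Int) (t : Int) (h : t ≠ -1) :
    solvedOf (xs ++ [t]) = solvedOf xs ++ [(xs.length : Int)] := by
  simp [solvedOf, enumerate_append_singleton, List.filterMap_append, h]

lemma mem_filterMap_enumerate_bound (xs : List Int) (s i : Int)
    (h : i ∈ (PySem.List.enumerate xs s).filterMap
      (fun it => if it.2 ≠ -1 then some it.1 else none)) :
    s ≤ i ∧ i < s + xs.length := by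
  induction xs generalizing s with
  | nil => simp [PySem.List.enumerate] at h
  | cons a rest ih =>
    rw [PySem.List.enumerate_cons, List.filterMap_cons] at h
    simp only [List.length_cons]
    by_cases ha : a = -1
    · rw [show (if ((s, a) : Int × Int).2 ≠ -1 then some ((s, a) : Int × Int).1 else none) = none
        by simp [ha]] at h
      have := ih (s + 1) h
      push_cast at *
      omega
    · rw [show (if ((s, a) : Int × Int).2 ≠ -1 then some ((s, a) : Int × Int).1 else none) = some s
        by simp [ha]] at h
      rcases List.mem_cons.1 h with rfl | h
      · push_cast; omega
      · have := ih (s + 1) h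
        push_cast at *
        omega

lemma mem_solvedOf_bound (xs : List Int) (i : Int) (h : i ∈ solvedOf xs) :
    0 ≤ i ∧ i < xs.length := by
  have := mem_filterMap_enumerate_bound xs 0 i h
  omega

-- ---- max? of a list capped by an appended top element ----
def maxStep (acc : Option Int) (x : Int) : Option Int :=
  match acc with
  | none => some x
  | some m => if m < x then some x else some m

lemma max?_eq_foldl (l : List Int) :
    PySem.List.max? l (fun i => i) = l.foldl maxStep none := by
  unfold PySem.List.max? maxStep
  congr 1
  funext acc x
  cases acc <;> rfl

lemma foldl_maxStep_bound (c : Int) (l : List Int) (acc : Option Int)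
    (hl : ∀ x ∈ l, x < c) (hacc : ∀ m, acc = some m → m < c) :
    ∀ m, l.foldl maxStep acc = some m → m < c := by
  induction l generalizing acc with
  | nil => intro m hm; exact hacc m (by simpa using hm)
  | cons a rest ih =>
    intro m hm
    rw [List.foldl_cons] at hm
    refine ih (maxStep acc a) (fun x hx => hl x (List.mem_cons_of_mem _ hx)) ?_ m hm
    intro m0 hm0
    cases acc with
    | none =>
      simp [maxStep] at hm0
      subst hm0
      exact hl a (by simp)
    | some m1 =>
      have hm1 : m1 < c := hacc m1 rfl
      by_cases hx : m1 < a
      · simp [maxStep, hx] at hm0; subst hm0; exact hl a (by simp)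
      · simp [maxStep, hx] at hm0; subst hm0; exact hm1

lemma max?_append_top (l : List Int) (c : Int) (h : ∀ x ∈ l, x < c) :
    PySem.List.max? (l ++ [c]) (fun i => i) = some c := by
  rw [max?_eq_foldl, List.foldl_append]
  cases hr : l.foldl maxStep none with
  | none => simp [maxStep]
  | some m =>
    have hm : m < c := foldl_maxStep_bound c l none h (by simp) m hr
    simp [maxStep, hm]

-- ---- the two range loops as list predicates ----
lemma pyGetD_append_left (xs zs : List Int) (i d : Int)
    (h0 : 0 ≤ i) (h1 : i < xs.length) :
    PySem.List.pyGetD (xs ++ zs) i d = PySem.List.pyGetD xs i d := by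
  rw [PySem.List.pyGetD_eq_getElem _ d h0 (by simp; omega),
    PySem.List.pyGetD_eq_getElem _ d h0 h1]
  exact List.getElem_append_left (by omega)

lemma all_range_pyGetD (ys : List Int) (p : Int → Bool) :
    ((PySem.List.pyRange 0 (ys.length : Int)).all fun i => p (PySem.List.pyGetD ys i 0))
      = ys.all p := by
  have h := List.all_map (l := PySem.List.pyRange 0 (ys.length : Int))
    (f := fun j => PySem.List.pyGetD ys j 0) (p := p)
  rw [PySem.List.map_pyGetD_pyRange_zero' ys 0] at h
  rw [h]
  rfl

lemma range_all_getD_chk (ys : List Int) :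
    ((List.range (ys.length - 1)).all fun k => decide (ys.getD k 0 ≤ ys.getD (k + 1) 0))
      = chk ys := by
  induction ys with
  | nil => simp [chk]
  | cons a rest ih =>
    cases rest with
    | nil => simp [chk]
    | cons b r =>
      rw [show (a :: b :: r).length - 1 = (b :: r).length - 1 + 1 by simp]
      rw [List.range_succ_eq_map, List.all_cons, List.all_map]
      rw [show chk (a :: b :: r) = (decide (a ≤ b) && chk (b :: r)) from rfl, ← ih]
      congr 1

lemma all_range_chk (ys : List Int) (n : Nat) (hn : ys.length = n + 1) :
    ((PySem.List.pyRange 0 (n : Int)).all fun i =>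
        !(decide (PySem.List.pyGetD ys i 0 > PySem.List.pyGetD ys (i + 1) 0)))
      = chk ys := by
  rw [PySem.List.pyRange_zero_natCast, List.all_map]
  rw [← range_all_getD_chk ys, hn]
  simp only [Nat.add_sub_cancel]
  apply List.all_congr rfl
  intro k
  have hcast : ((k : Int) + 1) = ((k + 1 : Nat) : Int) := by push_cast; ring
  simp only [Function.comp, hcast, PySem.List.pyGetD_natCast]
  by_cases h : (ys[k]?.getD 0 : Int) ≤ ys[k + 1]?.getD 0
  · simp [h, not_lt.mpr h]
  · simp [h, not_le.mp h]

lemma all_congr_mem {α : Type} (l : List α) (p q : α → Bool)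
    (h : ∀ x ∈ l, p x = q x) : l.all p = l.all q := by
  induction l with
  | nil => rfl
  | cons a r ih =>
    simp only [List.all_cons, h a (by simp),
      ih fun x hx => h x (List.mem_cons_of_mem _ hx)]

-- ---- A = specD ----
lemma is_diligent_eq_specD (ts : List Int) : is_diligent ts = specD ts := by
  induction ts using List.reverseRecOn with
  | nil => rfl
  | append_singleton xs t ih =>
    by_cases ht : t = -1
    · subst ht
      have hspec : specD (xs ++ [-1]) = specD xs := by
        simp [specD, trimNeg_append_neg]
      rw [hspec, ← ih, is_diligent_unfold, is_diligent_unfold, solvedOf_append_neg]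
      rcases hm : PySem.List.max? (solvedOf xs) (fun i => i) with _ | m
      · rfl
      · have hb := mem_solvedOf_bound xs m (PySem.List.max?_mem hm)
        have e1 : ((PySem.List.pyRange 0 (m + 1)).all fun i =>
              !(PySem.List.pyGetD (xs ++ [-1]) i 0 == -1))
            = ((PySem.List.pyRange 0 (m + 1)).all fun i =>
              !(PySem.List.pyGetD xs i 0 == -1)) := by
          apply all_congr_mem
          intro i hi
          rw [PySem.List.mem_pyRange_one] at hi
          rw [pyGetD_append_left xs [-1] i 0 hi.1 (by omega)]
        have e2 : ((PySem.List.pyRange 0 m).all fun i =>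
              !(decide (PySem.List.pyGetD (xs ++ [-1]) i 0
                  > PySem.List.pyGetD (xs ++ [-1]) (i + 1) 0)))
            = ((PySem.List.pyRange 0 m).all fun i =>
              !(decide (PySem.List.pyGetD xs i 0 > PySem.List.pyGetD xs (i + 1) 0))) := by
          apply all_congr_mem
          intro i hi
          rw [PySem.List.mem_pyRange_one] at hi
          rw [pyGetD_append_left xs [-1] i 0 hi.1 (by omega),
            pyGetD_append_left xs [-1] (i + 1) 0 (by omega) (by omega)]
        simp only [e1, e2]
    · rw [is_diligent_unfold, solvedOf_append_ne xs t ht]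
      have hmax := max?_append_top (solvedOf xs) (xs.length)
        (fun x hx => (mem_solvedOf_bound xs x hx).2)
      rw [hmax]
      have hempty : (solvedOf xs ++ [(xs.length : Int)]).isEmpty = false := by simp
      rw [hempty]
      have hlen : ((xs ++ [t]).length : Int) = (xs.length : Int) + 1 := by
        simp
      have h1 : ((PySem.List.pyRange 0 ((xs.length : Int) + 1)).all fun i =>
            !(PySem.List.pyGetD (xs ++ [t]) i 0 == -1))
          = (xs ++ [t]).all (fun x => !(x == -1)) := by
        rw [← hlen, all_range_pyGetD (xs ++ [t]) (fun x => !(x == -1))]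
      have h2 := all_range_chk (xs ++ [t]) xs.length (by simp)
      simp only [Bool.if_false_left]
      rw [h1, h2, specD, trimNeg_append_ne xs t ht]
      rw [show (!(xs ++ [t]).isEmpty) = true by simp, Bool.true_and]
      ac_rfl

-- ---- B = specD ----
lemma altLoop_gap (xs : List Int) (prev : Option Int) (solved : Bool) :
    altLoop xs prev true solved = (xs.all (· == -1) && solved) := by
  induction xs generalizing prev with
  | nil => simp [altLoop]
  | cons t rest ih =>
    by_cases ht : t = -1
    · simp [altLoop, ht, ih]
    · simp [altLoop, ht]

lemma altLoop_main (xs : List Int) (p : Int) :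
    altLoop xs (some p) false true
      = ((trimNeg xs).all (· != -1) && chk (p :: trimNeg xs)) := by
  induction xs generalizing p with
  | nil => simp [altLoop, trimNeg, chk]
  | cons t rest ih =>
    by_cases ht : t = -1
    · subst ht
      rw [show altLoop (-1 :: rest) (some p) false true
          = altLoop rest (some p) true true from rfl, altLoop_gap]
      cases hys : trimNeg rest with
      | nil =>
        have : rest.all (· == -1) := (trimNeg_nil_iff rest).1 hys
        simp [trimNeg, hys, this, chk]
      | cons y ys =>
        have : ¬ rest.all (· == -1) := by
          rw [← trimNeg_nil_iff, hys]; simp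
        simp [trimNeg, hys, this]
    · rw [show altLoop (t :: rest) (some p) false true
        = if t = -1 then altLoop rest (some p) true true
          else if t < p then false else altLoop rest (some t) false true from rfl]
      rw [trimNeg_cons_ne t rest ht]
      simp only [ht, if_false]
      by_cases hlt : t < p
      · have hnle : ¬ (p ≤ t) := by omega
        cases hys : trimNeg rest <;> simp [hlt, chk, hnle]
      · have hple : p ≤ t := by omega
        rw [if_neg hlt, ih]
        have hbne : (t != -1) = true := by simp [bne, ht]
        cases hys : trimNeg rest <;> simp [chk, hple, hbne]

lemma is_diligent_alt_eq_specD (ts : List Int) : is_diligent_alt ts = specD ts := by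
  cases ts with
  | nil => rfl
  | cons t rest =>
    by_cases ht : t = -1
    · subst ht
      rw [show is_diligent_alt (-1 :: rest) = altLoop rest none true false from rfl, altLoop_gap]
      cases hys : trimNeg rest with
      | nil => simp [specD, trimNeg, hys]
      | cons y ys => simp [specD, trimNeg, hys]
    · rw [show is_diligent_alt (t :: rest)
        = if t = -1 then altLoop rest none true false
          else altLoop rest (some t) false true from rfl]
      rw [if_neg ht, altLoop_main, specD, trimNeg_cons_ne t rest ht]
      have hbne : (t != -1) = true := by simp [bne, ht]
      cases hys : trimNeg rest <;> simp [chk, hbne]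

-- ===== VERDICT (by name: the statement is the Claim_ definition above) =====
theorem is_diligent_spec : Claim_equal_is_diligent := by
  intro times _
  unfold Spec_is_diligent
  rw [is_diligent_eq_specD, is_diligent_alt_eq_specD]
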